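-- pv_equiv track=rewrite | github.com/tgrishanina/codewars | supermarket_queue.py | queue_time
-- ===== SOURCE A (Python) =====
-- import heapq
--
-- def queue_time(customers, n):
--     # Create a list to represent the checkout tills
--     tills = [0] * n
--
--     # Use a heap (priority queue) to efficiently get the till with the minimum time
--     heapq.heapify(tills)
--
--     for time in customers:
--         # Assign the customer to the till with the least time
--         # Pop the smallest element (till that will be available the earliest)
--         earliest_till = heapq.heappop(tills)
--
--         # Add the customer's checkout time to this till's time
--         earliest_till += time
--
--         # Push the updated time back into the heap
--         heapq.heappush(tills, earliest_till)
--
--     # The total time required will be the maximum time in the tills list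
--     return max(tills)
-- ===== SOURCE B (Python) =====
-- def queue_time(customers, n):
--     tills = [0] * n
--     for time in customers:
--         earliest = 0
--         for j in range(n):
--             if tills[j] < tills[earliest]:
--                 earliest = j
--         tills[earliest] += time
--     return max(tills)
-- ===== Notes on version B (the rewrite author's own statement) =====
-- stated objective: simpler
-- what changed: Replaces the heapq priority queue (heapify/heappop/heappush) by a plain list of n till times with an explicit index scan to find the earliest till, updated in place.
import Mathlib
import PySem

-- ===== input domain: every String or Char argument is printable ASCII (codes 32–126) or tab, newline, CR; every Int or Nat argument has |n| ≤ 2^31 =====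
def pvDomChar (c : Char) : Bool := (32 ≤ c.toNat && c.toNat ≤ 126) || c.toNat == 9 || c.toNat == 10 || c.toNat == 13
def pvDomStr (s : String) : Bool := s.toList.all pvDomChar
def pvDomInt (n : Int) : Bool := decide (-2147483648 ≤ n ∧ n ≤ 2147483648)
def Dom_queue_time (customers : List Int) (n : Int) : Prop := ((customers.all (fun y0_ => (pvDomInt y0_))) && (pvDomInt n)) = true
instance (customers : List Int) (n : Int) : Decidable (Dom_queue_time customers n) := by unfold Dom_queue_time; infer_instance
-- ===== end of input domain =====

-- B replaces A's heapq priority queue by a plain list with an explicit argmin index scan: simpler.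

-- ===== PORT A =====
-- heapify of [0]*n is the identity (all zeros already satisfy the heap property).
-- heappop returns the minimum of the heap and removes one occurrence of it; heappush adds
-- the element: ported by hand at the level of the multiset of till times (exact for the
-- returned value, which depends only on that multiset). heappop on an empty heap raises
-- IndexError, and max([]) raises ValueError: both excluded by Pre_ (n ≥ 1).
def queue_time (customers : List Int) (n : Int) : Int :=
  let tills : List Int := List.replicate n.toNat 0
  let tills := customers.foldl (fun t time =>
      let earliest_till := (t.min?).getD 0
      (t.erase earliest_till) ++ [earliest_till + time]) tills
  (tills.max?).getD 0

-- ===== PORT B =====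
-- A Python list is a dynamic array (O(1) indexing), ported as Array. [0]*n is empty for
-- n ≤ 0 and range(n) is then empty too, so n.toNat is exact; the indices produced by
-- range(n) are nonnegative and within tills, so getD/setIfInBounds are exact there; the
-- out-of-range access tills[earliest] for n ≤ 0 (IndexError in Python) is excluded by Pre_.
def queue_time_alt (customers : List Int) (n : Int) : Int :=
  let tills : Array Int := Array.replicate n.toNat 0
  let tills := customers.foldl (fun t time =>
      let earliest := (List.range n.toNat).foldl
        (fun e j => if t.getD j 0 < t.getD e 0 then j else e) 0
      t.setIfInBounds earliest (t.getD earliest 0 + time)) tills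
  (tills.toList.max?).getD 0

-- ===== PRECONDITION & SPEC =====
-- Pre_ excludes exactly n ≤ 0, where Python A raises (IndexError from heappop of the empty
-- heap if customers ≠ [], else ValueError from max([])); B raises there too.
def Pre_queue_time (customers : List Int) (n : Int) : Prop := 1 ≤ n
instance (customers : List Int) (n : Int) : Decidable (Pre_queue_time customers n) := by unfold Pre_queue_time; infer_instance
def pvWitness_queue_time : List Int × Int := ([5, 3, 4], 1)
def Spec_queue_time (customers : List Int) (n : Int) (out : Int) : Prop := out = queue_time_alt customers n
instance (customers : List Int) (n : Int) (out : Int) : Decidable (Spec_queue_time customers n out) := by unfold Spec_queue_time; infer_instance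

-- ===== CLAIM (what is proved, stated in full; the proofs are below) =====
def Claim_equal_queue_time : Prop := ∀ (customers : List Int) (n : Int), Dom_queue_time customers n → Pre_queue_time customers n → Spec_queue_time customers n (queue_time customers n)

-- ===== LEMMAS AND PROOFS =====

-- the argmin fold of B: result index and minimality
lemma pv_argmin_spec (l : List Int) :
    ∀ m : Nat, (let e := (List.range m).foldl (fun e j => if l.getD j 0 < l.getD e 0 then j else e) 0;
      (e = 0 ∨ e < m) ∧ ∀ k < m, l.getD e 0 ≤ l.getD k 0) := by
  intro m
  induction m with
  | zero => simp
  | succ m ih =>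
    obtain ⟨he, hmin⟩ := ih
    simp only [List.range_succ, List.foldl_append, List.foldl_cons, List.foldl_nil]
    constructor
    · split_ifs with h
      · right; omega
      · rcases he with h0 | hlt
        · left; exact h0
        · right; omega
    · intro k hk
      split_ifs with h
      · rcases Nat.lt_succ_iff_lt_or_eq.mp hk with hk' | hk'
        · exact le_trans (le_of_lt h) (hmin k hk')
        · subst hk'; exact le_refl _
      · rcases Nat.lt_succ_iff_lt_or_eq.mp hk with hk' | hk'
        · exact hmin k hk'
        · subst hk'; exact le_of_not_gt h

lemma pv_ms_getD (l : List Int) (i : Nat) (h : i < l.length) :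
    (↑l : Multiset Int) = l.getD i 0 ::ₘ ↑(l.eraseIdx i) := by
  induction l generalizing i with
  | nil => simp at h
  | cons a t ih =>
    cases i with
    | zero => simp
    | succ i =>
      simp only [List.length_cons, Nat.add_lt_add_iff_right] at h
      simp only [List.getD_cons_succ, List.eraseIdx_cons_succ]
      calc (↑(a :: t) : Multiset Int) = a ::ₘ ↑t := by simp
        _ = a ::ₘ (t.getD i 0 ::ₘ ↑(t.eraseIdx i)) := by rw [← ih i h]
        _ = t.getD i 0 ::ₘ (a ::ₘ ↑(t.eraseIdx i)) := Multiset.cons_swap _ _ _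
        _ = t.getD i 0 ::ₘ ↑(a :: t.eraseIdx i) := by simp

lemma pv_ms_set (l : List Int) (i : Nat) (v : Int) (h : i < l.length) :
    (↑(l.set i v) : Multiset Int) = v ::ₘ ↑(l.eraseIdx i) := by
  induction l generalizing i with
  | nil => simp at h
  | cons a t ih =>
    cases i with
    | zero => simp
    | succ i =>
      simp only [List.length_cons, Nat.add_lt_add_iff_right] at h
      simp only [List.set_cons_succ, List.eraseIdx_cons_succ]
      calc (↑(a :: t.set i v) : Multiset Int) = a ::ₘ ↑(t.set i v) := by simp
        _ = a ::ₘ (v ::ₘ ↑(t.eraseIdx i)) := by rw [ih i h]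
        _ = v ::ₘ (a ::ₘ ↑(t.eraseIdx i)) := Multiset.cons_swap _ _ _
        _ = v ::ₘ ↑(a :: t.eraseIdx i) := by simp


lemma pv_min?_perm (a b : List Int) (h : List.Perm a b) : a.min? = b.min? := by
  cases ha : a.min? with
  | none =>
    rw [List.min?_eq_none_iff] at ha
    subst ha
    rw [h.symm.eq_nil, List.min?_eq_none_iff.mpr rfl]
  | some m =>
    rw [List.min?_eq_some_iff] at ha
    exact ((List.min?_eq_some_iff).mpr ⟨h.mem_iff.mp ha.1, fun x hx => ha.2 x (h.mem_iff.mpr hx)⟩).symm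

lemma pv_max?_perm (a b : List Int) (h : List.Perm a b) : a.max? = b.max? := by
  cases ha : a.max? with
  | none =>
    rw [List.max?_eq_none_iff] at ha
    subst ha
    rw [h.symm.eq_nil, List.max?_eq_none_iff.mpr rfl]
  | some m =>
    rw [List.max?_eq_some_iff] at ha
    exact ((List.max?_eq_some_iff).mpr ⟨h.mem_iff.mp ha.1, fun x hx => ha.2 x (h.mem_iff.mpr hx)⟩).symm

-- one loop iteration: A's pop-min/push and B's argmin-update produce equal multisets
lemma pv_step (a b : List Int) (time : Int) (N : Nat) (hN : 0 < N)
    (hab : (↑a : Multiset Int) = ↑b) (hb : b.length = N) :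
    (↑((a.erase ((a.min?).getD 0)) ++ [(a.min?).getD 0 + time]) : Multiset Int)
      = ↑(b.set ((List.range N).foldl (fun e j => if b.getD j 0 < b.getD e 0 then j else e) 0)
            (b.getD ((List.range N).foldl (fun e j => if b.getD j 0 < b.getD e 0 then j else e) 0) 0 + time))
    ∧ (b.set ((List.range N).foldl (fun e j => if b.getD j 0 < b.getD e 0 then j else e) 0)
          (b.getD ((List.range N).foldl (fun e j => if b.getD j 0 < b.getD e 0 then j else e) 0) 0 + time)).length = N := by
  have hperm : List.Perm a b := Multiset.coe_eq_coe.mp hab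
  obtain ⟨he, hmin⟩ := pv_argmin_spec b N
  generalize hE : (List.range N).foldl (fun e j => if b.getD j 0 < b.getD e 0 then j else e) 0 = e at he hmin ⊢
  have heN : e < N := by omega
  have heb : e < b.length := by omega
  -- b.getD e 0 is the minimum of b
  have hmem : b.getD e 0 ∈ b := by
    rw [List.getD_eq_getElem b 0 heb]; exact List.getElem_mem heb
  have hle : ∀ x ∈ b, b.getD e 0 ≤ x := by
    intro x hx
    obtain ⟨i, hi, rfl⟩ := List.mem_iff_getElem.mp hx
    have := hmin i (by omega)
    rwa [List.getD_eq_getElem b 0 hi] at this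
  have hbmin : b.min? = some (b.getD e 0) := List.min?_eq_some_iff.mpr ⟨hmem, hle⟩
  have hm : (a.min?).getD 0 = b.getD e 0 := by
    rw [pv_min?_perm a b hperm, hbmin]; rfl
  have hma : (a.min?).getD 0 ∈ a := hperm.mem_iff.mpr (hm ▸ hmem)
  -- multiset equations
  have h1 : (↑a : Multiset Int) = (a.min?).getD 0 ::ₘ ↑(a.erase ((a.min?).getD 0)) :=
    Multiset.coe_eq_coe.mpr (List.perm_cons_erase hma)
  have h2 : (↑b : Multiset Int) = b.getD e 0 ::ₘ ↑(b.eraseIdx e) := pv_ms_getD b e heb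
  have h3 : (↑(a.erase ((a.min?).getD 0)) : Multiset Int) = ↑(b.eraseIdx e) := by
    have := hab
    rw [h1, h2, ← hm] at this
    exact (Multiset.cons_inj_right _).mp this
  constructor
  · rw [pv_ms_set b e _ heb, ← hm]
    have h4 : (↑((a.erase ((a.min?).getD 0)) ++ [(a.min?).getD 0 + time]) : Multiset Int)
        = ((a.min?).getD 0 + time) ::ₘ ↑(a.erase ((a.min?).getD 0)) :=
      Multiset.coe_eq_coe.mpr (List.perm_append_singleton _ _)
    rw [h4, h3]
  · rw [List.length_set]; exact hb

-- loop invariant: along the fold, A's and B's till lists stay equal as multisets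
lemma pv_fold (cs : List Int) (N : Nat) (hN : 0 < N) :
    ∀ a b : List Int, (↑a : Multiset Int) = ↑b → b.length = N →
    (↑(cs.foldl (fun t time =>
        let earliest_till := (t.min?).getD 0
        (t.erase earliest_till) ++ [earliest_till + time]) a) : Multiset Int)
      = ↑(cs.foldl (fun t time =>
        let earliest := (List.range N).foldl (fun e j => if t.getD j 0 < t.getD e 0 then j else e) 0
        t.set earliest (t.getD earliest 0 + time)) b)
    ∧ (cs.foldl (fun t time =>
        let earliest := (List.range N).foldl (fun e j => if t.getD j 0 < t.getD e 0 then j else e) 0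
        t.set earliest (t.getD earliest 0 + time)) b).length = N := by
  induction cs with
  | nil => intro a b hab hb; exact ⟨hab, hb⟩
  | cons c cs ih =>
    intro a b hab hb
    simp only [List.foldl_cons]
    obtain ⟨h1, h2⟩ := pv_step a b c N hN hab hb
    exact ih _ _ h1 h2

lemma pv_arr_getD (a : Array Int) (i : Nat) (d : Int) : a.getD i d = a.toList.getD i d := by
  simp [Array.getD, List.getD]
  split_ifs with h
  · rw [Array.getElem?_eq_getElem h]; simp
  · rw [Array.getElem?_eq_none (by omega)]; rfl

-- B's array-level loop, read through toList, is the list-level loop of pv_fold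
lemma pv_fold_toList (cs : List Int) (N : Nat) :
    ∀ t : Array Int,
    (cs.foldl (fun t time =>
        let earliest := (List.range N).foldl (fun e j => if t.getD j 0 < t.getD e 0 then j else e) 0
        t.setIfInBounds earliest (t.getD earliest 0 + time)) t).toList
      = cs.foldl (fun t time =>
        let earliest := (List.range N).foldl (fun e j => if t.getD j 0 < t.getD e 0 then j else e) 0
        t.set earliest (t.getD earliest 0 + time)) t.toList := by
  induction cs with
  | nil => intro t; rfl
  | cons c cs ih =>
    intro t
    simp only [List.foldl_cons]
    rw [ih]
    have he : (List.range N).foldl (fun e j => if t.getD j 0 < t.getD e 0 then j else e) 0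
        = (List.range N).foldl (fun e j => if t.toList.getD j 0 < t.toList.getD e 0 then j else e) 0 := by
      have hf : (fun (e j : Nat) => if t.getD j 0 < t.getD e 0 then j else e)
          = (fun (e j : Nat) => if t.toList.getD j 0 < t.toList.getD e 0 then j else e) := by
        funext e j; rw [pv_arr_getD, pv_arr_getD]
      rw [hf]
    congr 1
    dsimp only
    rw [Array.toList_setIfInBounds, pv_arr_getD, he]

-- ===== VERDICT (by name: the statement is the Claim_ definition above) =====
theorem queue_time_spec : Claim_equal_queue_time := by
  intro customers n _ hpre
  unfold Spec_queue_time queue_time queue_time_alt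
  dsimp only
  have hN : 0 < n.toNat := by unfold Pre_queue_time at hpre; omega
  obtain ⟨hms, _⟩ := pv_fold customers n.toNat hN
    (List.replicate n.toNat 0) (List.replicate n.toNat 0) rfl (List.length_replicate)
  rw [pv_fold_toList customers n.toNat (Array.replicate n.toNat 0), Array.toList_replicate,
    pv_max?_perm _ _ (Multiset.coe_eq_coe.mp hms)]
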